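-- pv_equiv track=rewrite | github.com/callummckee/DoA-from-EEG | permutationentropy.py | PE_sort
-- ===== SOURCE A (Python) =====
-- def PE_sort(m_dimension_vectors):
--     X = []
--     for vector in m_dimension_vectors:
--         sorted_vector = sorted(vector)
--         index_form = []
--         for element in vector:
--             index = sorted_vector.index(element) + 1
--             index_form.append(index)
--         X.append(index_form)
--
--     return X
-- ===== SOURCE B (Python) =====
-- def PE_sort(m_dimension_vectors):
--     return [[1 + sum(1 for y in vector if y < element) for element in vector]
--             for vector in m_dimension_vectors]
-- ===== Notes on version B (the rewrite author's own statement) =====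
-- stated objective: simpler
-- what changed: Replaces the sort-then-repeated-.index scan per vector with a direct comparison count: each rank is 1 plus the number of strictly smaller elements, computed in a nested comprehension with no sorting and no index search.
import Mathlib
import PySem

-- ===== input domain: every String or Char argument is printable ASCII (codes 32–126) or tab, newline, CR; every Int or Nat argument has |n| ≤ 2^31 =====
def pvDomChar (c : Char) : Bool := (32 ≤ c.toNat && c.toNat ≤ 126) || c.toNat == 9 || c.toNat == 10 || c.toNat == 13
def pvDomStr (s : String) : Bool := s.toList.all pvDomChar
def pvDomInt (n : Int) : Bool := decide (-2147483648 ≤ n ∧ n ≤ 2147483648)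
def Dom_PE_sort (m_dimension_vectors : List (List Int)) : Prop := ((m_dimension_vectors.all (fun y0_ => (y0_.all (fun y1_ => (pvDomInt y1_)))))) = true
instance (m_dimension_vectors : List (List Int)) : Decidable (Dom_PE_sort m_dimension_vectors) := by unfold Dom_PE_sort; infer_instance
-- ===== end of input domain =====

-- B replaces the sort-then-.index scan with a direct count of strictly smaller elements (simpler, same cost).


-- ===== PORT A =====
-- sorted_vector.index(element) always succeeds (element ∈ vector), so .getD 0 is never the default.
def PE_sort (m_dimension_vectors : List (List Int)) : List (List Int) :=
  m_dimension_vectors.foldl (fun X vector =>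
    let sorted_vector := PySem.List.sorted vector (fun x => x) false
    let index_form := vector.foldl (fun acc element =>
      acc ++ [((PySem.List.index? sorted_vector element).getD 0 : Int) + 1]) []
    X ++ [index_form]) []

-- ===== PORT B =====
def PE_sort_alt (m_dimension_vectors : List (List Int)) : List (List Int) :=
  m_dimension_vectors.map (fun vector =>
    vector.map (fun element => 1 + (vector.countP (fun y => y < element) : Int)))

-- ===== PRECONDITION & SPEC =====
def Spec_PE_sort (m_dimension_vectors : List (List Int)) (out : List (List Int)) : Prop := out = PE_sort_alt m_dimension_vectors
instance (m_dimension_vectors : List (List Int)) (out : List (List Int)) : Decidable (Spec_PE_sort m_dimension_vectors out) := by unfold Spec_PE_sort; infer_instance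

-- ===== CLAIM (what is proved, stated in full; the proofs are below) =====
def Claim_equal_PE_sort : Prop := ∀ (m_dimension_vectors : List (List Int)), Dom_PE_sort m_dimension_vectors → Spec_PE_sort m_dimension_vectors (PE_sort m_dimension_vectors)

-- ===== LEMMAS AND PROOFS =====

theorem foldl_app_singleton_eq_map {α β : Type} (f : α → β) (l : List α) (a : List β) :
    l.foldl (fun acc x => acc ++ [f x]) a = a ++ l.map f := by
  induction l generalizing a with
  | nil => simp
  | cons x t ih => simp [List.foldl, ih]

-- In a weakly sorted list, the index of the first occurrence of a member equals
-- the number of strictly smaller elements.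
theorem idxOf?_sorted_eq_countP (s : List Int) (e : Int)
    (hs : s.Pairwise (· ≤ ·)) (he : e ∈ s) :
    List.idxOf? e s = some (s.countP (fun y => decide (y < e))) := by
  induction s with
  | nil => cases he
  | cons x t ih =>
    rcases List.pairwise_cons.1 hs with ⟨hx, ht⟩
    by_cases hxe : x = e
    · subst hxe
      have : t.countP (fun y => decide (y < x)) = 0 := by
        apply List.countP_eq_zero.2
        intro y hy
        simp [not_lt.2 (hx y hy)]
      simp [List.idxOf?_cons, this]
    · have het : e ∈ t := by
        rcases List.mem_cons.1 he with h | h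
        · exact absurd h.symm hxe
        · exact h
      have hxlt : x < e := lt_of_le_of_ne (hx e het) hxe
      have := ih ht het
      simp [List.idxOf?_cons, hxe, this, hxlt, Nat.add_comm]

theorem index_form_eq (vector : List Int) :
    vector.foldl (fun acc element =>
      acc ++ [((PySem.List.index? (PySem.List.sorted vector (fun x => x) false) element).getD 0 : Int) + 1]) []
    = vector.map (fun element => 1 + (vector.countP (fun y => y < element) : Int)) := by
  rw [foldl_app_singleton_eq_map]
  simp only [List.nil_append]
  apply List.map_congr_left
  intro e he
  have hperm := PySem.List.sorted_perm vector (fun x => x) false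
  have hpw : (PySem.List.sorted vector (fun x => x) false).Pairwise (· ≤ ·) :=
    PySem.List.sorted_pairwise vector (fun x => x)
  have hmem : e ∈ PySem.List.sorted vector (fun x => x) false :=
    (hperm.mem_iff).2 he
  have hidx := idxOf?_sorted_eq_countP _ e hpw hmem
  have hcnt : (PySem.List.sorted vector (fun x => x) false).countP (fun y => decide (y < e))
      = vector.countP (fun y => decide (y < e)) := hperm.countP_eq _
  rw [PySem.List.index?_eq_idxOf?, hidx, hcnt]
  simp [Int.add_comm]

theorem PE_sort_spec : Claim_equal_PE_sort := by
  intro mv _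
  unfold Spec_PE_sort PE_sort PE_sort_alt
  rw [foldl_app_singleton_eq_map]
  simp only [List.nil_append]
  apply List.map_congr_left
  intro v _
  exact index_form_eq v
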